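-- pv_equiv track=rewrite | github.com/shivpandey02/CodePractice | vipul_codechef/RECENTCONT.py | count_problem
-- ===== SOURCE A (Python) =====
-- def count_problem(contest_codes):
--     # Initialize counters for each contest
--     start38_count = 0
--     ltime108_count = 0
--
--     # Iterate through the contest codes and count the problems for each contest
--     for i in contest_codes:
--         if i == 'START38':
--             start38_count+=1
--         else:
--             ltime108_count+=1
--     # Return the count of problems for each contest
--     return (start38_count,ltime108_count)
-- ===== SOURCE B (Python) =====
-- def count_problem(contest_codes):
--     lst = list(contest_codes)
--
--     def go(seg):
--         # divide-and-conquer: split the segment in half, combine counts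
--         if len(seg) == 0:
--             return (0, 0)
--         if len(seg) == 1:
--             return (1, 0) if seg[0] == 'START38' else (0, 1)
--         mid = len(seg) // 2
--         s1, o1 = go(seg[:mid])
--         s2, o2 = go(seg[mid:])
--         return (s1 + s2, o1 + o2)
--
--     return go(lst)
-- ===== Notes on version B (the rewrite author's own statement) =====
-- stated objective: alternative
-- what changed: Replaces A's single left-to-right loop with two running counters by a divide-and-conquer recursion that splits the list in half, counts each half independently, and sums the two pairs.
import Mathlib
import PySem

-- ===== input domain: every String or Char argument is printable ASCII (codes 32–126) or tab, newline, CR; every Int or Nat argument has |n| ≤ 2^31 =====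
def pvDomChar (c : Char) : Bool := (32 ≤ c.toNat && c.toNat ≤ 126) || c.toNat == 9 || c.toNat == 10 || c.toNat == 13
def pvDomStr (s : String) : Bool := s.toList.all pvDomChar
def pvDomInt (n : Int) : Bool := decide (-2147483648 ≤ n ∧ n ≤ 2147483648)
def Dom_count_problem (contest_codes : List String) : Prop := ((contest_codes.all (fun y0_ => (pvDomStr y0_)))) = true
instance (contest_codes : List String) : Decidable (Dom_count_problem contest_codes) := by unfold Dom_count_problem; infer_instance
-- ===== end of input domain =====

-- B replaces A's dual-counter loop with a divide-and-conquer recursion (split in half, combine); objective: alternative, not faster.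
-- ===== PORT A =====
def count_problem (contest_codes : List String) : Int × Int :=
  contest_codes.foldl
    (fun (acc : Int × Int) i =>
      if i = "START38" then (acc.1 + 1, acc.2) else (acc.1, acc.2 + 1))
    (0, 0)

-- ===== PORT B =====
-- go(seg): divide-and-conquer on the segment, as in Source B (seg[:mid] / seg[mid:] = take/drop at mid)
def cpGo (seg : List String) : Int × Int :=
  if _h0 : seg.length = 0 then (0, 0)
  else if _h1 : seg.length = 1 then
    if seg.headI = "START38" then (1, 0) else (0, 1)
  else
    let mid := seg.length / 2
    let p1 := cpGo (seg.take mid)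
    let p2 := cpGo (seg.drop mid)
    (p1.1 + p2.1, p1.2 + p2.2)
termination_by seg.length
decreasing_by
  · simp [List.length_take]; omega
  · simp [List.length_drop]; omega

def count_problem_alt (contest_codes : List String) : Int × Int :=
  cpGo contest_codes

-- ===== PRECONDITION & SPEC =====
def Spec_count_problem (contest_codes : List String) (out : Int × Int) : Prop := out = count_problem_alt contest_codes
instance (contest_codes : List String) (out : Int × Int) : Decidable (Spec_count_problem contest_codes out) := by unfold Spec_count_problem; infer_instance

-- ===== CLAIM (what is proved, stated in full; the proofs are below) =====
def Claim_equal_count_problem : Prop := ∀ (contest_codes : List String), Dom_count_problem contest_codes → Spec_count_problem contest_codes (count_problem contest_codes)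

-- ===== LEMMAS AND PROOFS =====

lemma cpGo_eq (seg : List String) :
    cpGo seg = ((seg.count "START38" : Int),
                ((seg.length : Int) - (seg.count "START38" : Int))) := by
  induction seg using cpGo.induct with
  | case1 seg h0 =>
    rw [cpGo]
    simp_all [List.length_eq_zero_iff]
  | case2 seg h0 h1 hhd =>
    rw [cpGo]
    rcases seg with _ | ⟨x, _ | ⟨y, t⟩⟩ <;> simp_all [List.count_cons]
  | case3 seg h0 h1 hhd =>
    rw [cpGo]
    rcases seg with _ | ⟨x, _ | ⟨y, t⟩⟩ <;> simp_all [List.count_cons]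
  | case4 seg h0 h1 mid ih1 ih2 =>
    rw [cpGo]
    simp only [h0, h1, dite_false]
    have e1 : cpGo (seg.take (seg.length / 2))
        = (((seg.take (seg.length / 2)).count "START38" : Int),
           (((seg.take (seg.length / 2)).length : Int)
             - ((seg.take (seg.length / 2)).count "START38" : Int))) := ih1
    have e2 : cpGo (seg.drop (seg.length / 2))
        = (((seg.drop (seg.length / 2)).count "START38" : Int),
           (((seg.drop (seg.length / 2)).length : Int)
             - ((seg.drop (seg.length / 2)).count "START38" : Int))) := ih2
    rw [e1, e2]
    have hsplit := List.take_append_drop (seg.length / 2) seg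
    have hc : (seg.take (seg.length / 2)).count "START38"
        + (seg.drop (seg.length / 2)).count "START38" = seg.count "START38" := by
      conv_rhs => rw [← hsplit]
      rw [List.count_append]
    have hl : (seg.take (seg.length / 2)).length
        + (seg.drop (seg.length / 2)).length = seg.length := by
      conv_rhs => rw [← hsplit]
      rw [List.length_append]
    rw [Prod.mk.injEq]
    omega

lemma count_problem_loop (l : List String) (a b : Int) :
    l.foldl
      (fun (acc : Int × Int) i =>
        if i = "START38" then (acc.1 + 1, acc.2) else (acc.1, acc.2 + 1))
      (a, b)
      = (a + (l.count "START38" : Int),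
         b + ((l.length : Int) - (l.count "START38" : Int))) := by
  induction l generalizing a b with
  | nil => simp
  | cons h t ih =>
    by_cases hh : h = "START38" <;>
      simp [List.foldl, hh, ih, List.count_cons] <;> push_cast <;> ring_nf

-- ===== VERDICT =====
theorem count_problem_spec : Claim_equal_count_problem := by
  intro l _
  unfold Spec_count_problem count_problem count_problem_alt
  rw [cpGo_eq, count_problem_loop]
  simp
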